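-- pv_equiv track=rewrite | github.com/Olivera2708/Codeforces | #799 virtual/2^sort.py | jeste
-- ===== SOURCE A (Python) =====
-- def jeste(niz, poslednji, broj, el):
--     if broj == 1:
--         return True
--     if len(niz) < broj-1:
--         return False
--     if poslednji < niz[0] * el:
--         return jeste(niz[1:], niz[0] * el, broj-1, el*2)
--     else:
--         return False
-- ===== SOURCE B (Python) =====
-- def jeste(niz, poslednji, broj, el):
--     if broj == 1:
--         return True
--     if len(niz) < broj - 1:
--         return False
--     done = 1
--     for x in niz:
--         if poslednji < x * el:
--             poslednji = x * el
--             el *= 2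
--             done += 1
--             if done == broj:
--                 return True
--         else:
--             return False
--     return False
-- ===== Notes on version B (the rewrite author's own statement) =====
-- stated objective: faster
-- what changed: Replaces A's recursion, which copies the list with niz[1:] and re-checks the length at every step, by a single upfront length check and one flat for-loop over niz with a success counter and no copying.
import Mathlib
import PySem

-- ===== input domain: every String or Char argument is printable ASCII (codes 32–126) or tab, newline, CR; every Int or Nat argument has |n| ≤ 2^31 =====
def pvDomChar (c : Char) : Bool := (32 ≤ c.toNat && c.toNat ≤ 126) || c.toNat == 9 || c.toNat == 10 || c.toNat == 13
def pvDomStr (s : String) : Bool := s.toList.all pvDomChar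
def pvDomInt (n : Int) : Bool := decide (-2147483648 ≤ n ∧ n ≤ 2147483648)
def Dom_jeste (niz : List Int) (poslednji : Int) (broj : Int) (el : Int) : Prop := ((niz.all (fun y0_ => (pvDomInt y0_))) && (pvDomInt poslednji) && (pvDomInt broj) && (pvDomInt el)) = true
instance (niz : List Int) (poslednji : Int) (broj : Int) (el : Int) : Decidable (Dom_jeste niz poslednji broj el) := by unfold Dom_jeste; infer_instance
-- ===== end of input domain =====

-- B replaces A's recursion (which copies the list with niz[1:] and re-checks the length every
-- step) by one upfront length check and a single flat loop with a success counter; objective: faster.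


-- ===== PORT A =====
-- literal transliteration of A; on a nonempty list niz[0] is the head and niz[1:] the tail
-- (exact); on the empty list niz[0] raises IndexError in Python — that case (reachable only
-- with broj ≤ 0) is excluded by Pre_jeste, and the port returns false there.
def jeste (niz : List Int) (poslednji : Int) (broj : Int) (el : Int) : Bool :=
  if broj = 1 then true
  else if (niz.length : Int) < broj - 1 then false
  else
    match niz with
    | [] => false  -- Python: IndexError (outside Pre_jeste)
    | x :: rest =>
        if poslednji < x * el then jeste rest (x * el) (broj - 1) (el * 2)
        else false

-- ===== PORT B =====
-- B's for-loop over niz with mutable (poslednji, el, done); `done` counts chain steps made.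
def jesteLoop (niz : List Int) (poslednji : Int) (broj : Int) (el : Int) (done : Int) : Bool :=
  match niz with
  | [] => false
  | x :: rest =>
      if poslednji < x * el then
        if done + 1 = broj then true
        else jesteLoop rest (x * el) broj (el * 2) (done + 1)
      else false

def jeste_alt (niz : List Int) (poslednji : Int) (broj : Int) (el : Int) : Bool :=
  if broj = 1 then true
  else if (niz.length : Int) < broj - 1 then false
  else jesteLoop niz poslednji broj el 1

-- ===== PRECONDITION & SPEC =====
-- ChainAllProp niz p e: the strict chain p < niz[0]*e < niz[1]*(2*e) < ... < niz[i]*(2^i*e) < ...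
-- holds at every index of the list (closed form: each step only compares adjacent elements).
def ChainAllProp (niz : List Int) (p : Int) (e : Int) : Prop :=
  ∀ i : Nat, i < niz.length →
    (if i = 0 then p else niz.getD (i - 1) 0 * (e * 2 ^ (i - 1))) < niz.getD i 0 * (e * 2 ^ i)

-- A raises IndexError exactly when broj ≤ 0 and the strict chain holds through the whole list
-- (the recursion runs off the end); Pre_ excludes exactly those inputs and nothing else.
def Pre_jeste (niz : List Int) (poslednji : Int) (broj : Int) (el : Int) : Prop :=
  1 ≤ broj ∨ ¬ ChainAllProp niz poslednji el
instance (niz : List Int) (poslednji : Int) (broj : Int) (el : Int) : Decidable (Pre_jeste niz poslednji broj el) := by unfold Pre_jeste ChainAllProp; infer_instance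

def pvWitness_jeste : List Int × Int × Int × Int := ([1, 2, 3], 0, 3, 1)

def Spec_jeste (niz : List Int) (poslednji : Int) (broj : Int) (el : Int) (out : Bool) : Prop := out = jeste_alt niz poslednji broj el
instance (niz : List Int) (poslednji : Int) (broj : Int) (el : Int) (out : Bool) : Decidable (Spec_jeste niz poslednji broj el out) := by unfold Spec_jeste; infer_instance

-- ===== CLAIM (what is proved, stated in full; the proofs are below) =====
def Claim_equal_jeste : Prop := ∀ (niz : List Int) (poslednji : Int) (broj : Int) (el : Int), Dom_jeste niz poslednji broj el → Pre_jeste niz poslednji broj el → Spec_jeste niz poslednji broj el (jeste niz poslednji broj el)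
-- ===== LEMMAS AND PROOFS =====

lemma chainProp_nil (p e : Int) : ChainAllProp [] p e := by
  intro i hi; simp at hi

lemma chainProp_cons (x : Int) (rest : List Int) (p e : Int) :
    ChainAllProp (x :: rest) p e ↔ (p < x * e ∧ ChainAllProp rest (x * e) (e * 2)) := by
  constructor
  · intro h
    refine ⟨by simpa using h 0 (by simp), ?_⟩
    intro i hi
    have h2 := h (i + 1) (by simp; omega)
    cases i with
    | zero => simpa [mul_comm, mul_assoc, mul_left_comm] using h2
    | succ j =>
        simp only [Nat.add_sub_cancel, List.getD_cons_succ, Nat.succ_sub_one] at h2 ⊢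
        have e1 : e * 2 * 2 ^ j = e * 2 ^ (j + 1) := by ring
        have e2 : e * 2 * 2 ^ (j + 1) = e * 2 ^ (j + 1 + 1) := by ring
        simp only [if_neg (Nat.succ_ne_zero j)] at h2 ⊢
        rw [e1, e2]
        exact h2
  · rintro ⟨h0, h⟩ i hi
    cases i with
    | zero => simpa using h0
    | succ j =>
        have h2 := h j (by simpa using hi)
        simp only [Nat.succ_sub_one, List.getD_cons_succ, if_neg (Nat.succ_ne_zero j)]
        cases j with
        | zero => simpa [mul_comm, mul_assoc, mul_left_comm] using h2
        | succ k =>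
            simp only [Nat.succ_sub_one, List.getD_cons_succ,
              if_neg (Nat.succ_ne_zero k)] at h2
            have e1 : e * 2 * 2 ^ k = e * 2 ^ (k + 1) := by ring
            have e2 : e * 2 * 2 ^ (k + 1) = e * 2 ^ (k + 1 + 1) := by ring
            rw [e1, e2] at h2
            exact h2

-- With enough elements left, A's countdown recursion equals B's counting loop: the offset
-- B - done = broj - 1 is the invariant.
lemma jeste_eq_loop : ∀ (niz : List Int) (p b e B d : Int),
    B - d = b - 1 → 2 ≤ b → b - 1 ≤ (niz.length : Int) →
    jeste niz p b e = jesteLoop niz p B e d := by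
  intro niz
  induction niz with
  | nil => intro p b e B d h1 h2 h3; simp at h3; omega
  | cons x rest ih =>
      intro p b e B d h1 h2 h3
      have hlen3 : ((x :: rest).length : Int) = (rest.length : Int) + 1 := by
        simp
      rw [jeste.eq_def, jesteLoop]
      have hb1 : ¬ b = 1 := by omega
      have hlen : ¬ (((x :: rest).length : Int) < b - 1) := by omega
      simp only [hb1, if_false, hlen, if_false]
      by_cases hc : p < x * e
      · simp only [hc, if_true]
        by_cases hb2 : b = 2
        · have hd : d + 1 = B := by omega
          subst hb2
          rw [jeste.eq_def]
          simp [hd]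
        · have hne : ¬ (d + 1 = B) := by omega
          simp only [hne, if_false]
          exact ih (x * e) (b - 1) (e * 2) B (d + 1) (by omega) (by omega) (by omega)
      · simp [hc]

-- With broj ≤ 0 and the chain broken somewhere, A returns False.
lemma jeste_neg : ∀ (niz : List Int) (p b e : Int),
    b ≤ 0 → ¬ ChainAllProp niz p e → jeste niz p b e = false := by
  intro niz
  induction niz with
  | nil => intro p b e hb hc; exact absurd (chainProp_nil p e) hc
  | cons x rest ih =>
      intro p b e hb hc
      rw [jeste.eq_def]
      have hb1 : ¬ b = 1 := by omega
      have hlen : ¬ (((x :: rest).length : Int) < b - 1) := by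
        have : (0 : Int) ≤ ((x :: rest).length : Int) := by positivity
        omega
      simp only [hb1, if_false, hlen, if_false]
      by_cases hp : p < x * e
      · simp only [hp, if_true]
        have : ¬ ChainAllProp rest (x * e) (e * 2) := by
          intro h; exact hc ((chainProp_cons x rest p e).mpr ⟨hp, h⟩)
        exact ih (x * e) (b - 1) (e * 2) (by omega) this
      · simp [hp]

-- With broj ≤ done and the chain broken somewhere, B's loop returns False.
lemma loop_neg : ∀ (niz : List Int) (p b e d : Int),
    b ≤ d → ¬ ChainAllProp niz p e → jesteLoop niz p b e d = false := by
  intro niz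
  induction niz with
  | nil => intro p b e d hb hc; rfl
  | cons x rest ih =>
      intro p b e d hb hc
      rw [jesteLoop]
      by_cases hp : p < x * e
      · have hne : ¬ (d + 1 = b) := by omega
        simp only [hp, if_true, hne, if_false]
        have : ¬ ChainAllProp rest (x * e) (e * 2) := by
          intro h; exact hc ((chainProp_cons x rest p e).mpr ⟨hp, h⟩)
        exact ih (x * e) b (e * 2) (d + 1) (by omega) this
      · simp [hp]

-- ===== VERDICT (by name: the statement is the Claim_ definition above) =====
theorem jeste_spec : Claim_equal_jeste := by
  intro niz p b e _hdom hpre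
  unfold Spec_jeste
  by_cases hb1 : b = 1
  · subst hb1; rw [jeste.eq_def, jeste_alt]; simp
  · by_cases hlen : ((niz.length : Int)) < b - 1
    · rw [jeste.eq_def, jeste_alt]; simp [hb1, hlen]
    · by_cases hb2 : 2 ≤ b
      · rw [jeste_alt]
        simp only [hb1, if_false, hlen, if_false]
        exact jeste_eq_loop niz p b e b 1 (by omega) hb2 (by omega)
      · -- b ≤ 0; Pre_ forces the chain to break, so both sides return false
        have hbneg : b ≤ 0 := by omega
        have hchain : ¬ ChainAllProp niz p e := by
          rcases hpre with h | h
          · omega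
          · exact h
        rw [jeste_alt]
        simp only [hb1, if_false, hlen, if_false]
        rw [jeste_neg niz p b e hbneg hchain, loop_neg niz p b e 1 (by omega) hchain]
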